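-- pv_equiv track=rewrite | github.com/vlattt/PythonLab6 | laba 6.py | is_latin_square
-- ===== SOURCE A (Python) =====
-- def is_latin_square(matrix):
--     n = len(matrix)
--
--     for row in matrix:
--         if sorted(row) != list(range(1, n+1)):
--             return False
--
--     for j in range(n):
--         column = [matrix[i][j] for i in range(n)]
--         if sorted(column) != list(range(1, n+1)):
--             return False
--
--     return True
-- ===== SOURCE B (Python) =====
-- def is_latin_square(matrix):
--     n = len(matrix)
--     target = set(range(1, n + 1))
--     cols = [set() for _ in range(n)]
--     for row in matrix:
--         if len(row) != n or set(row) != target: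
--             return False
--         for j, v in enumerate(row):
--             cols[j].add(v)
--     return all(c == target for c in cols)
-- ===== Notes on version B (the rewrite author's own statement) =====
-- stated objective: alternative
-- what changed: Single pass over the rows that checks each row by length+set equality and folds entries into per-column sets, replacing A's per-row sort plus a second transpose-and-sort pass over the columns.
import Mathlib
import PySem

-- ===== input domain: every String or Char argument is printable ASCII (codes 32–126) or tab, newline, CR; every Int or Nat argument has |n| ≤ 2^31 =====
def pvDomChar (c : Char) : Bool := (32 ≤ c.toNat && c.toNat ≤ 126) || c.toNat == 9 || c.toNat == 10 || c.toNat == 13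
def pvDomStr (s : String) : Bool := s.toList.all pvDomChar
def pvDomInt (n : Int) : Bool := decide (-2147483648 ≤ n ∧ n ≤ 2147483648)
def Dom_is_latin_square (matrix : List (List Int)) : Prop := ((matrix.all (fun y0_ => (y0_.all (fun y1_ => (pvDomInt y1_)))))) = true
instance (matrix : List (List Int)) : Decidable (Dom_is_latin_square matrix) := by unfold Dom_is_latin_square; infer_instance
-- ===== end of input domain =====

-- B replaces A's per-row sort plus a second transpose-and-sort column pass by one pass over the rows
-- (length + set test per row, entries folded into per-column sets); return values agree everywhere.

-- ===== PORT A =====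
-- first loop: 'for row in matrix: if sorted(row) != list(range(1, n+1)): return False'
def latinRowsA (tgt : List Int) : List (List Int) → Bool
  | [] => true
  | r :: rs => if (PySem.List.sorted r (fun x => x)) ≠ tgt then false else latinRowsA tgt rs

-- second loop over j in range(n); 'matrix[i][j]' via pyGetD: the defaults are unreachable, since this
-- loop only runs after every row passed the first check (hence has length n) and 0 ≤ i, j < n.
def latinColsA (matrix : List (List Int)) (n : Int) (tgt : List Int) : List Int → Bool
  | [] => true
  | j :: js =>
      let column := (PySem.List.pyRange 0 n).map (fun i => PySem.List.pyGetD (PySem.List.pyGetD matrix i []) j 0)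
      if (PySem.List.sorted column (fun x => x)) ≠ tgt then false else latinColsA matrix n tgt js

def is_latin_square (matrix : List (List Int)) : Bool :=
  let n := matrix.length
  let tgt := PySem.List.pyRange 1 ((n : Int) + 1)
  if latinRowsA tgt matrix then latinColsA matrix (n : Int) tgt (PySem.List.pyRange 0 (n : Int)) else false

-- ===== PORT B =====
-- inner loop: 'for j, v in enumerate(row): cols[j].add(v)'
def latinColsAddB (cols : List (PySem.Set Int)) (pairs : List (Int × Int)) : List (PySem.Set Int) :=
  pairs.foldl (fun cs jv =>
    PySem.List.pySetD cs jv.1 (PySem.Set.add (PySem.List.pyGetD cs jv.1 PySem.Set.empty) jv.2)) cols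

-- row loop with early 'return False' (none) carrying the cols accumulator
def latinRowsB (n : Nat) (tgt : PySem.Set Int) (cols : List (PySem.Set Int)) :
    List (List Int) → Option (List (PySem.Set Int))
  | [] => some cols
  | r :: rs =>
      if r.length ≠ n ∨ ¬ (PySem.Set.equal (PySem.Set.ofList r) tgt = true) then none
      else latinRowsB n tgt (latinColsAddB cols (PySem.List.enumerate r)) rs

def is_latin_square_alt (matrix : List (List Int)) : Bool :=
  let n := matrix.length
  let tgt : PySem.Set Int := PySem.Set.ofList (PySem.List.pyRange 1 ((n : Int) + 1))
  match latinRowsB n tgt (List.replicate n PySem.Set.empty) matrix with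
  | none => false
  | some cols => cols.all (fun c => PySem.Set.equal c tgt)

-- ===== PRECONDITION & SPEC =====
def Spec_is_latin_square (matrix : List (List Int)) (out : Bool) : Prop := out = is_latin_square_alt matrix
instance (matrix : List (List Int)) (out : Bool) : Decidable (Spec_is_latin_square matrix out) := by unfold Spec_is_latin_square; infer_instance

-- ===== CLAIM (what is proved, stated in full; the proofs are below) =====
def Claim_equal_is_latin_square : Prop := ∀ (matrix : List (List Int)), Dom_is_latin_square matrix → Spec_is_latin_square matrix (is_latin_square matrix)

-- ===== LEMMAS AND PROOFS =====

-- the target list [1, …, n]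
lemma tgt_eq (n : Nat) :
    PySem.List.pyRange 1 ((n : Int) + 1) = (List.range n).map (fun k : Nat => ((k : Int) + 1)) := by
  induction n with
  | zero => decide
  | succ n ih =>
      have h1 : (1 : Int) ≤ (n : Int) + 1 := by omega
      have : ((n + 1 : Nat) : Int) + 1 = ((n : Int) + 1) + 1 := by push_cast; ring
      rw [this, PySem.List.pyRange_one_succ_right h1, ih, List.range_succ, List.map_append]
      simp

lemma tgt_pairwise (n : Nat) :
    (PySem.List.pyRange 1 ((n : Int) + 1)).Pairwise (· < ·) := by
  rw [tgt_eq]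
  exact (List.pairwise_lt_range).map _ (by intro a b h; omega)

lemma tgt_nodup (n : Nat) : (PySem.List.pyRange 1 ((n : Int) + 1)).Nodup :=
  (tgt_pairwise n).imp (fun h => ne_of_lt h)

lemma tgt_length (n : Nat) : (PySem.List.pyRange 1 ((n : Int) + 1)).length = n := by
  rw [tgt_eq]; simp

-- a row passes A's test iff it passes B's test
lemma row_iff (n : Nat) (r : List Int) :
    (PySem.List.sorted r (fun x => x) = PySem.List.pyRange 1 ((n : Int) + 1)) ↔
      (r.length = n ∧ PySem.Set.equal (PySem.Set.ofList r)
        (PySem.Set.ofList (PySem.List.pyRange 1 ((n : Int) + 1))) = true) := by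
  set tgt := PySem.List.pyRange 1 ((n : Int) + 1) with htgt
  have hsort : PySem.List.sorted tgt (fun x => x) = tgt :=
    PySem.List.sorted_eq_self_of_pairwise tgt _ ((tgt_pairwise n).imp le_of_lt)
  have hperm : (PySem.List.sorted r (fun x => x) = tgt) ↔ r.Perm tgt := by
    have h := PySem.List.sorted_id_eq_sorted_id_iff_perm r tgt
    rwa [hsort] at h
  rw [hperm]
  constructor
  · intro hp
    refine ⟨by rw [hp.length_eq, tgt_length], ?_⟩
    rw [PySem.Set.equal_iff]
    intro x
    rw [PySem.Set.mem_ofList, PySem.Set.mem_ofList]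
    exact ⟨fun h => hp.mem_iff.mp h, fun h => hp.mem_iff.mpr h⟩
  · rintro ⟨hlen, heq⟩
    rw [PySem.Set.equal_iff] at heq
    have hsub : tgt ⊆ r := by
      intro x hx
      have := (heq x).mpr (by rw [PySem.Set.mem_ofList]; exact hx)
      rwa [PySem.Set.mem_ofList] at this
    have hsp : tgt.Subperm r := (tgt_nodup n).subperm hsub
    exact (hsp.perm_of_length_le (by rw [hlen, tgt_length])).symm

-- A's row loop is an 'all'
lemma latinRowsA_eq (tgt : List Int) (rows : List (List Int)) :
    latinRowsA tgt rows = rows.all (fun r => PySem.List.sorted r (fun x => x) == tgt) := by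
  induction rows with
  | nil => rfl
  | cons r rs ih =>
      simp only [latinRowsA, List.all_cons, ih]
      by_cases h : PySem.List.sorted r (fun x => x) = tgt
      · simp [h]
      · simp [h]

-- B's row loop: 'all rows pass' decides, and the cols accumulator is a fold
lemma latinRowsB_eq (n : Nat) (tgt : PySem.Set Int) (rows : List (List Int)) (cols : List (PySem.Set Int)) :
    latinRowsB n tgt cols rows =
      if rows.all (fun r => r.length == n && PySem.Set.equal (PySem.Set.ofList r) tgt) then
        some (rows.foldl (fun cs r => latinColsAddB cs (PySem.List.enumerate r)) cols)
      else none := by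
  induction rows generalizing cols with
  | nil => rfl
  | cons r rs ih =>
      simp only [latinRowsB, List.all_cons, List.foldl_cons]
      by_cases h1 : r.length = n
      · by_cases h2 : PySem.Set.equal (PySem.Set.ofList r) tgt = true
        · rw [if_neg (by simp [h1, h2]), ih]
          simp only [h1, h2, beq_self_eq_true, Bool.true_and]
        · rw [if_pos (Or.inr h2), if_neg (by simp [h1, h2])]
      · rw [if_pos (by simp [h1]), if_neg (by simp [h1])]

-- one row folded into the column sets (enumerate starting at k)
lemma latinColsAddB_enum (r : List Int) (k : Nat) (cs : List (PySem.Set Int))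
    (h : k + r.length ≤ cs.length) :
    latinColsAddB cs (PySem.List.enumerate r (k : Int)) =
      cs.take k ++ List.zipWith PySem.Set.add (cs.drop k) r ++ cs.drop (k + r.length) := by
  induction r generalizing k cs with
  | nil =>
      simp [latinColsAddB, PySem.List.enumerate, List.take_append_drop]
  | cons v r ih =>
      have hk : k < cs.length := by simp at h; omega
      have hget : PySem.List.pyGetD cs (k : Int) PySem.Set.empty = cs[k] := by
        rw [PySem.List.pyGetD_natCast, List.getD_eq_getElem _ _ hk]
      have hcast : (k : Int) + 1 = ((k + 1 : Nat) : Int) := by push_cast; ring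
      simp only [latinColsAddB, PySem.List.enumerate, List.foldl_cons] at *
      rw [hget, PySem.List.pySetD_natCast, hcast, ih (k + 1) _ (by simp; simp at h; omega)]
      have hdrop1 : (cs.set k (PySem.Set.add cs[k] v)).drop (k + 1) = cs.drop (k + 1) :=
        List.drop_set_of_lt (by omega)
      have hdrop2 : (cs.set k (PySem.Set.add cs[k] v)).drop (k + 1 + r.length) = cs.drop (k + 1 + r.length) :=
        List.drop_set_of_lt (by omega)
      have htake : (cs.set k (PySem.Set.add cs[k] v)).take (k + 1) = cs.take k ++ [PySem.Set.add cs[k] v] := by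
        rw [List.set_eq_take_append_cons_drop, if_pos hk]
        rw [List.take_append]
        simp [List.length_take, Nat.min_eq_left (le_of_lt hk)]
      rw [hdrop1, hdrop2, htake, List.drop_eq_getElem_cons hk]
      simp only [List.zipWith_cons_cons]
      have : k + (v :: r).length = k + 1 + r.length := by simp; omega
      rw [this]
      simp [List.append_assoc]

-- the accumulated cols: column j is the fold of the j-th entries
lemma cols_fold (n : Nat) (rows : List (List Int)) (cs : List (PySem.Set Int))
    (hr : ∀ r ∈ rows, r.length = n) (hc : cs.length = n) :
    rows.foldl (fun cs r => latinColsAddB cs (PySem.List.enumerate r)) cs =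
      (List.range n).map (fun j : Nat =>
        (rows.map (fun r => PySem.List.pyGetD r (j : Int) 0)).foldl PySem.Set.add
          (cs.getD j PySem.Set.empty)) := by
  induction rows generalizing cs with
  | nil =>
      simp only [List.foldl_nil, List.map_nil]
      apply List.ext_getElem
      · simp [hc]
      · intro j h1 h2
        simp only [List.getElem_map, List.getElem_range]
        rw [List.getD_eq_getElem _ _ (by omega)]
  | cons r rows ih =>
      have hrn : r.length = n := hr r (by simp)
      have hstep : latinColsAddB cs (PySem.List.enumerate r) =
          List.zipWith PySem.Set.add cs r := by
        have h0 : ((0 : Nat) : Int) = (0 : Int) := by norm_num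
        have := latinColsAddB_enum r 0 cs (by omega)
        rw [h0] at this
        have hnil : cs.drop n = [] := by rw [← hc]; simp
        simpa [hrn, hc, hnil] using this
      simp only [List.foldl_cons, hstep]
      rw [ih (List.zipWith PySem.Set.add cs r) (fun r' hr' => hr r' (by simp [hr'])) (by simp [hc, hrn])]
      apply List.map_congr_left
      intro j hj
      have hjn : j < n := List.mem_range.mp hj
      simp only [List.map_cons, List.foldl_cons]
      congr 1
      rw [List.getD_eq_getElem _ _ (by simp [hc, hrn]; omega), List.getElem_zipWith,
        List.getD_eq_getElem _ _ (by omega), PySem.List.pyGetD_natCast,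
        List.getD_eq_getElem _ _ (by omega)]

-- A's column comprehension is a map over the rows (all rows length n)
lemma column_eq (matrix : List (List Int)) (n : Nat) (hn : matrix.length = n) (j : Int) :
    (PySem.List.pyRange 0 (n : Int)).map
        (fun i => PySem.List.pyGetD (PySem.List.pyGetD matrix i []) j 0) =
      matrix.map (fun r => PySem.List.pyGetD r j 0) := by
  rw [PySem.List.pyRange_zero_natCast, List.map_map]
  apply List.ext_getElem
  · simp [hn]
  · intro i h1 h2
    simp only [List.getElem_map, List.getElem_range, Function.comp_apply]
    rw [PySem.List.pyGetD_natCast, List.getD_eq_getElem _ _ (by simp at h1; omega)]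

-- A's column loop is an 'all' over range(n)
lemma latinColsA_eq (matrix : List (List Int)) (n : Int) (tgt : List Int) (js : List Int) :
    latinColsA matrix n tgt js =
      js.all (fun j => PySem.List.sorted
        ((PySem.List.pyRange 0 n).map (fun i => PySem.List.pyGetD (PySem.List.pyGetD matrix i []) j 0))
        (fun x => x) == tgt) := by
  induction js with
  | nil => rfl
  | cons j js ih =>
      simp only [latinColsA, List.all_cons, ih]
      by_cases h : PySem.List.sorted ((PySem.List.pyRange 0 n).map (fun i => PySem.List.pyGetD (PySem.List.pyGetD matrix i []) j 0)) (fun x => x) = tgt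
      · simp [h]
      · simp [h]

-- ===== VERDICT (by name: the statement is the Claim_ definition above) =====
-- pointwise: A's row test and B's row test are the same Boolean
lemma rowtest_eq (n : Nat) (r : List Int) :
    (PySem.List.sorted r (fun x => x) == PySem.List.pyRange 1 ((n : Int) + 1)) =
      (r.length == n && PySem.Set.equal (PySem.Set.ofList r)
        (PySem.Set.ofList (PySem.List.pyRange 1 ((n : Int) + 1)))) := by
  rcases Bool.eq_false_or_eq_true (r.length == n && PySem.Set.equal (PySem.Set.ofList r)
      (PySem.Set.ofList (PySem.List.pyRange 1 ((n : Int) + 1)))) with hb | hb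
  · rw [hb, beq_iff_eq]
    apply (row_iff n r).mpr
    simp only [Bool.and_eq_true, beq_iff_eq] at hb
    exact hb
  · rw [hb, beq_eq_false_iff_ne]
    intro hs
    have h2 := (row_iff n r).mp hs
    simp only [Bool.and_eq_false_iff, beq_eq_false_iff_ne] at hb
    rcases hb with hb | hb
    · exact hb h2.1
    · simp [h2.2] at hb

theorem is_latin_square_spec : Claim_equal_is_latin_square := by
  intro matrix _
  unfold Spec_is_latin_square is_latin_square is_latin_square_alt
  simp only [latinRowsA_eq, latinRowsB_eq]
  set n := matrix.length with hn
  set tgt := PySem.List.pyRange 1 ((n : Int) + 1) with htgt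
  set tgtS := PySem.Set.ofList tgt with htgtS
  have hallEq : (matrix.all fun r => PySem.List.sorted r (fun x => x) == tgt) =
      (matrix.all fun r => r.length == n && PySem.Set.equal (PySem.Set.ofList r) tgtS) := by
    apply congrArg
    funext r
    exact rowtest_eq n r
  rw [hallEq]
  by_cases hcond : (matrix.all fun r => r.length == n && PySem.Set.equal (PySem.Set.ofList r) tgtS) = true
  · rw [hcond, if_pos rfl, if_pos rfl]
    have hlen : ∀ r ∈ matrix, r.length = n := by
      intro r hr
      have := List.all_eq_true.mp hcond r hr
      simp only [Bool.and_eq_true, beq_iff_eq] at this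
      exact this.1
    have hmatch : ∀ (F : List (PySem.Set Int)),
        (match some F with | none => false | some cols => cols.all fun c => PySem.Set.equal c tgtS) =
          F.all (fun c => PySem.Set.equal c tgtS) := fun F => rfl
    rw [cols_fold n matrix (List.replicate n PySem.Set.empty) hlen (by simp), hmatch,
      latinColsA_eq]
    simp only [column_eq matrix n hn.symm]
    rw [PySem.List.pyRange_zero_natCast, List.all_map, List.all_map]
    apply congrArg
    funext j
    simp only [Function.comp_apply]
    have hcl : (matrix.map (fun r => PySem.List.pyGetD r (j : Int) 0)).length = n := by simp [hn]
    have hfold : (matrix.map (fun r => PySem.List.pyGetD r (j : Int) 0)).foldl PySem.Set.add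
        (List.getD (List.replicate n PySem.Set.empty) j PySem.Set.empty) =
        PySem.Set.ofList (matrix.map (fun r => PySem.List.pyGetD r (j : Int) 0)) := by
      rw [PySem.Set.ofList_eq_foldl]
      congr 1
      rcases Nat.lt_or_ge j n with h | h
      · rw [List.getD_eq_getElem _ _ (by simp; omega)]; simp [PySem.Set.empty]
      · rw [List.getD_eq_default _ _ (by simp; omega)]; rfl
    rw [hfold, rowtest_eq n (matrix.map (fun r => PySem.List.pyGetD r (j : Int) 0))]
    simp [← hn, htgtS, htgt]
  · simp only [Bool.not_eq_true] at hcond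
    rw [hcond, if_neg (by simp), if_neg (by simp)]
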